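-- pv_equiv track=rewrite | github.com/gsaihemanth12/flipkart_ctf_solution | detector_saihemanth.py | check_if_full_name
-- ===== SOURCE A (Python) =====
-- def check_if_full_name(text):
--     # Name has multiple words
--     text = str(text).strip()
--     words = []
--     current_word = ""
--
--     for char in text:
--         if char == " ":
--             if current_word != "":
--                 words.append(current_word)
--                 current_word = ""
--         else:
--             current_word = current_word + char
--
--     if current_word != "":
--         words.append(current_word)
--
--     if len(words) >= 2:
--         return True
--     return False
-- ===== SOURCE B (Python) =====
-- def check_if_full_name(text):
--     # After stripping, the ends are non-whitespace, so any interior space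
--     # separates two nonempty words: ">= 2 words" == "contains a space".
--     return " " in str(text).strip()
-- ===== Notes on version B (the rewrite author's own statement) =====
-- stated objective: simpler
-- what changed: Replaces the char-by-char word-accumulating loop with a single space-containment test on the stripped string: once stripped, having at least two words is equivalent to containing a space.
import Mathlib
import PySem

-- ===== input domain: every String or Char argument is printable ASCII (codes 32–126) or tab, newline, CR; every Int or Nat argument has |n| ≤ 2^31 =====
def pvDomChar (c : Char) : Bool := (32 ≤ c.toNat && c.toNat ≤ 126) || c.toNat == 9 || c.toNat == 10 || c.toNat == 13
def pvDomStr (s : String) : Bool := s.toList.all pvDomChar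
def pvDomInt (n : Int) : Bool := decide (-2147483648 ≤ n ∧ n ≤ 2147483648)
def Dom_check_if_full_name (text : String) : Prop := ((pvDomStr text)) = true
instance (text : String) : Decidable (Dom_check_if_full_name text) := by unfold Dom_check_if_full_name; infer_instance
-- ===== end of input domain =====

-- B replaces A's word-accumulating loop by a single space-containment test on the stripped string (simpler).

-- ===== PORT A =====
def check_if_full_name (text : String) : Bool :=
  let t := PySem.Str.strip text
  let st := t.toList.foldl
    (fun (st : List String × String) c =>
      if c = ' ' then
        (if st.2 ≠ "" then (st.1 ++ [st.2], "") else st)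
      else
        (st.1, st.2.push c))
    ([], "")
  let words := if st.2 ≠ "" then st.1 ++ [st.2] else st.1
  decide (words.length ≥ 2)

-- ===== PORT B =====
def check_if_full_name_alt (text : String) : Bool :=
  PySem.Str.isIn " " (PySem.Str.strip text)

-- ===== PRECONDITION & SPEC =====
def Spec_check_if_full_name (text : String) (out : Bool) : Prop := out = check_if_full_name_alt text
instance (text : String) (out : Bool) : Decidable (Spec_check_if_full_name text out) := by unfold Spec_check_if_full_name; infer_instance

-- ===== CLAIM (what is proved, stated in full; the proofs are below) =====
def Claim_equal_check_if_full_name : Prop := ∀ (text : String), Dom_check_if_full_name text → Spec_check_if_full_name text (check_if_full_name text)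

-- ===== LEMMAS AND PROOFS =====

/-- Proof-side word counter: `pvCnt t b` = number of words A's loop emits while
processing `t`, starting with a current word that is nonempty iff `b`
(including the final flush). -/
def pvCnt : List Char → Bool → Nat
  | [], b => if b then 1 else 0
  | c :: t, b => if c = ' ' then (if b then 1 else 0) + pvCnt t false else pvCnt t true

theorem pvCnt_cons_space (t : List Char) (b : Bool) :
    pvCnt (' ' :: t) b = (if b then 1 else 0) + pvCnt t false := by
  simp [pvCnt]

theorem pvCnt_cons_ne (c : Char) (t : List Char) (b : Bool) (hc : ¬ c = ' ') :
    pvCnt (c :: t) b = pvCnt t true := by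
  simp [pvCnt, hc]

theorem pvFold_cnt (t : List Char) (ws : List String) (cur : String) :
    (let st := t.foldl
      (fun (st : List String × String) c =>
        if c = ' ' then
          (if st.2 ≠ "" then (st.1 ++ [st.2], "") else st)
        else
          (st.1, st.2.push c))
      (ws, cur)
     (if st.2 ≠ "" then st.1 ++ [st.2] else st.1).length)
    = ws.length + pvCnt t (cur ≠ "") := by
  induction t generalizing ws cur with
  | nil =>
    simp only [List.foldl_nil, pvCnt]
    split_ifs <;> simp_all
  | cons c t ih =>
    simp only [List.foldl_cons, pvCnt]
    by_cases hc : c = ' '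
    · subst hc
      by_cases hcur : cur ≠ ""
      · simp only [if_pos hcur, ih]
        simp [hcur, List.length_append]
        omega
      · simp only [if_neg hcur, ih]
        simp_all
    · have hne : cur.push c ≠ "" := by
        intro h
        have := congrArg String.toList h
        simp at this
      simp only [if_neg hc, ih]
      simp [hne]

theorem pvCnt_le_one_of_no_space (t : List Char) (b : Bool) (h : ' ' ∉ t) :
    pvCnt t b ≤ 1 := by
  induction t generalizing b with
  | nil => simp only [pvCnt]; split <;> omega
  | cons c t ih =>
    have hc : ¬ c = ' ' := by
      intro e; exact h (by rw [e]; exact List.mem_cons_self ..)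
    rw [pvCnt_cons_ne c t b hc]
    exact ih _ (fun hm => h (List.mem_cons_of_mem _ hm))

theorem pvCnt_true_pos (t : List Char) : 1 ≤ pvCnt t true := by
  induction t with
  | nil => simp [pvCnt]
  | cons c t ih =>
    by_cases hc : c = ' '
    · subst hc; rw [pvCnt_cons_space]; simp
    · rw [pvCnt_cons_ne c t true hc]; exact ih

theorem pvCnt_pos (t : List Char) (b : Bool) (h : ∃ c ∈ t, c ≠ ' ') :
    1 ≤ pvCnt t b := by
  induction t generalizing b with
  | nil => simp at h
  | cons c t ih =>
    by_cases hc : c = ' '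
    · subst hc
      have h' : ∃ c ∈ t, c ≠ ' ' := by
        obtain ⟨d, hd, hdne⟩ := h
        rcases List.mem_cons.mp hd with rfl | hmem
        · exact absurd rfl hdne
        · exact ⟨d, hmem, hdne⟩
      rw [pvCnt_cons_space]
      have := ih false h'
      simp
      omega
    · rw [pvCnt_cons_ne c t b hc]
      exact pvCnt_true_pos t

theorem pvGetLast?_cons_ne (a : Char) (t : List Char) (h : t ≠ []) :
    (a :: t).getLast? = t.getLast? := by
  cases t with
  | nil => exact absurd rfl h
  | cons b s => simp [List.getLast?_cons_cons]

theorem pvGetLast?_some (t : List Char) (h : t ≠ []) : ∃ c, t.getLast? = some c := by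
  cases t with
  | nil => exact absurd rfl h
  | cons b s => exact ⟨_, List.getLast?_cons⟩

theorem pvCnt_two (t : List Char) (hlast : t.getLast? ≠ some ' ') (hmem : ' ' ∈ t) :
    2 ≤ pvCnt t true := by
  induction t with
  | nil => simp at hmem
  | cons c t ih =>
    have htne : t ≠ [] := by
      rintro rfl
      simp at hmem
      rw [hmem] at hlast
      simp at hlast
    have hlast' : t.getLast? ≠ some ' ' := by
      rwa [pvGetLast?_cons_ne c t htne] at hlast
    by_cases hc : c = ' '
    · subst hc
      rw [pvCnt_cons_space]
      have hx : ∃ d ∈ t, d ≠ ' ' := by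
        obtain ⟨l, hl⟩ := pvGetLast?_some t htne
        refine ⟨l, List.mem_of_getLast? hl, ?_⟩
        intro h; rw [h] at hl; exact hlast' hl
      have := pvCnt_pos t false hx
      simp
      omega
    · have hmem' : ' ' ∈ t := by
        rcases List.mem_cons.mp hmem with h | h
        · exact absurd h.symm hc
        · exact h
      rw [pvCnt_cons_ne c t true hc]
      exact ih hlast' hmem'

theorem pvHead_dropWhile (m : List Char) (c : Char)
    (h : (List.dropWhile PySem.Chars.isspace m).head? = some c) :
    PySem.Chars.isspace c = false := by
  induction m with
  | nil => simp at h
  | cons a m ih =>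
    rw [List.dropWhile_cons] at h
    by_cases ha : PySem.Chars.isspace a = true
    · rw [if_pos ha] at h; exact ih h
    · rw [if_neg ha] at h
      simp at h
      rw [← h]
      simpa using ha

theorem pvHead_strip (l : List Char) (c : Char)
    (h : (PySem.Chars.strip l).head? = some c) : PySem.Chars.isspace c = false := by
  unfold PySem.Chars.strip PySem.Chars.rstrip at h
  set m := PySem.Chars.lstrip l with hm
  have hsuf : List.dropWhile PySem.Chars.isspace m.reverse <:+ m.reverse :=
    List.dropWhile_suffix _
  have hpre : (List.dropWhile PySem.Chars.isspace m.reverse).reverse <+: m := by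
    have := hsuf.reverse
    simpa using this
  obtain ⟨tl, htl⟩ := hpre
  have hmhead : m.head? = some c := by
    rw [← htl]
    cases hp : (List.dropWhile PySem.Chars.isspace m.reverse).reverse with
    | nil => rw [hp] at h; simp at h
    | cons x xs =>
      rw [hp] at h
      simpa using h
  apply pvHead_dropWhile l c
  rw [hm] at hmhead
  unfold PySem.Chars.lstrip at hmhead
  exact hmhead

theorem pvLast_strip (l : List Char) (c : Char)
    (h : (PySem.Chars.strip l).getLast? = some c) : PySem.Chars.isspace c = false := by
  unfold PySem.Chars.strip PySem.Chars.rstrip at h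
  rw [List.getLast?_reverse] at h
  exact pvHead_dropWhile _ c h

theorem pvIsIn_singleton (a : Char) (l : List Char) :
    PySem.Chars.isIn [a] l = decide (a ∈ l) := by
  by_cases h : a ∈ l
  · simp only [h, decide_true]
    rw [PySem.Chars.isIn_iff_infix]
    obtain ⟨s, t, rfl⟩ := List.append_of_mem h
    exact ⟨s, t, by simp⟩
  · simp only [h, decide_false]
    rw [PySem.Chars.isIn_eq_false_iff]
    intro hinf
    exact h (hinf.mem (List.mem_singleton_self a))

-- ===== VERDICT (by name: the statement is the Claim_ definition above) =====
theorem check_if_full_name_spec : Claim_equal_check_if_full_name := by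
  intro text _
  unfold Spec_check_if_full_name check_if_full_name check_if_full_name_alt
  have hA := pvFold_cnt (PySem.Str.strip text).toList [] ""
  simp only at hA ⊢
  rw [hA]
  have hBeq : PySem.Str.isIn " " (PySem.Str.strip text)
      = decide (' ' ∈ (PySem.Str.strip text).toList) := by
    rw [show PySem.Str.isIn " " (PySem.Str.strip text)
        = PySem.Chars.isIn " ".toList (PySem.Str.strip text).toList from by
          simp [PySem.Str.isIn]]
    exact pvIsIn_singleton ' ' _
  rw [hBeq]
  set t := (PySem.Str.strip text).toList with ht
  have htl : t = PySem.Chars.strip text.toList := by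
    rw [ht]; simp [PySem.Str.strip]
  have hb : (decide (("" : String) ≠ "")) = false := by decide
  rw [hb]
  simp only [List.length_nil, Nat.zero_add]
  by_cases hmem : ' ' ∈ t
  · have htne : t ≠ [] := List.ne_nil_of_mem hmem
    obtain ⟨c, rest, hrest⟩ : ∃ c rest, t = c :: rest := by
      cases ht2 : t with
      | nil => rw [ht2] at htne; exact absurd rfl htne
      | cons a r => exact ⟨a, r, rfl⟩
    have hhead : PySem.Chars.isspace c = false := by
      apply pvHead_strip text.toList c
      rw [← htl, hrest]
      rfl
    have hcsp : ¬ c = ' ' := by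
      intro h; rw [h] at hhead; simp [PySem.Chars.isspace] at hhead
    have hlast : t.getLast? ≠ some ' ' := by
      intro h
      have := pvLast_strip text.toList ' ' (htl ▸ h)
      simp [PySem.Chars.isspace] at this
    rw [hrest] at hmem hlast
    have hmem' : ' ' ∈ rest := by
      rcases List.mem_cons.mp hmem with h | h
      · exact absurd h.symm hcsp
      · exact h
    have hrne : rest ≠ [] := List.ne_nil_of_mem hmem'
    have hlast' : rest.getLast? ≠ some ' ' := by
      rwa [pvGetLast?_cons_ne c rest hrne] at hlast
    have h2 : 2 ≤ pvCnt t false := by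
      rw [hrest, pvCnt_cons_ne c rest false hcsp]
      exact pvCnt_two rest hlast' hmem'
    rw [hrest] at h2
    simp [hmem, hrest, h2]
  · have h1 : pvCnt t false ≤ 1 := pvCnt_le_one_of_no_space t false hmem
    have h2 : ¬ (2 ≤ pvCnt t false) := by omega
    simp [h2, hmem]
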